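-- pv_equiv track=rewrite | github.com/DanisTeng/Graph1005 | common.py | get_channel_name
-- ===== SOURCE A (Python) =====
-- from typing import List, Tuple
--
-- class Const1005:
--     lower_alphabet_chars = [chr(i) for i in range(97, 123)]
--     upper_alphabet_chars = [chr(i) for i in range(65, 91)]
--     number_chars = [chr(i) for i in range(48, 58)]
--
--     graph_output_pointer_prefix = "OPTR_"
--     graph_input_conveyor_prefix = "INCV_"
--     wrapper_graph_output_prefix = "wrapper_"
--     sympy_var_prefix = 'sympyvar'
--     unnamed_graph_var_prefix = 'graph_var_'
--     graph_output_prefix = 'output_'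
--     node_derivative_prefix = 'NODE_'
--     graph_derivative_prefix = "GRAPH_"
--     graph_constant_prefix = "G_CONSTANT_"
--     graph_unused_prefix = "G_UNUSED_"
--     input_channel_short = "input"
--     built_in_name_sub_strings = [graph_output_pointer_prefix, sympy_var_prefix, unnamed_graph_var_prefix,
--                                   graph_output_prefix]
--     indent = "  "
--
-- def get_channel_name(output_and_input_names: Tuple):
--     """
--
--     :param output_and_input_names: a tuple with length 1,2, or 3
--     :return:
--     (out,) out
--     (out,in1) D_out_D_in1
--     (out,in1,in2) D2_out_D_in1_D_in2
--     """
--     # in case some uses list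
--     names = tuple(output_and_input_names)
--
--     l = len(names)
--
--     assert all([is_valid_lower_case_cpp_name(name) for name in names]), "_get_channel_name: invalid input name."
--
--     if l == 1:
--         return names[0]
--     elif l == 2:
--         return "D_%s_D_%s" % names
--     elif l == 3:
--         return "D2_%s_D_%s_D_%s" % names
--     else:
--         assert False, "_get_channel_name: invalid input length."
--
-- def is_valid_lower_case_cpp_name(cpp_name: str):
--     count = 0
--     for c in cpp_name:
--         if (count > 0 and c in Const1005.number_chars) or \
--                 c in Const1005.lower_alphabet_chars or \
--                 c == '_':
--             pass
--         else:
--             return False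
--         count += 1
--     return count > 0
-- ===== SOURCE B (Python) =====
-- _ALLOWED = frozenset("abcdefghijklmnopqrstuvwxyz0123456789_")
--
-- def _fmt(names):
--     # right fold: peel the last name off and join with "_D_"
--     if len(names) == 1:
--         return names[0]
--     return _fmt(names[:-1]) + "_D_" + names[-1]
--
-- def get_channel_name(output_and_input_names):
--     names = list(output_and_input_names)
--     assert all(set(n) <= _ALLOWED and (n[:1].islower() or n[:1] == "_")
--                for n in names), "_get_channel_name: invalid input name."
--     assert 1 <= len(names) <= 3, "_get_channel_name: invalid input length."
--     return ("", "D_", "D2_")[len(names) - 1] + _fmt(names)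
-- ===== Notes on version B (the rewrite author's own statement) =====
-- stated objective: alternative
-- what changed: Name validation becomes a set-inclusion test against a frozen allowed-character set plus a first-character check (replacing A's counter-driven per-character scan), and the result is built by a right-fold recursion joining names with '_D_' behind a length-indexed prefix table (replacing A's three fixed %-format strings).
import Mathlib
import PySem

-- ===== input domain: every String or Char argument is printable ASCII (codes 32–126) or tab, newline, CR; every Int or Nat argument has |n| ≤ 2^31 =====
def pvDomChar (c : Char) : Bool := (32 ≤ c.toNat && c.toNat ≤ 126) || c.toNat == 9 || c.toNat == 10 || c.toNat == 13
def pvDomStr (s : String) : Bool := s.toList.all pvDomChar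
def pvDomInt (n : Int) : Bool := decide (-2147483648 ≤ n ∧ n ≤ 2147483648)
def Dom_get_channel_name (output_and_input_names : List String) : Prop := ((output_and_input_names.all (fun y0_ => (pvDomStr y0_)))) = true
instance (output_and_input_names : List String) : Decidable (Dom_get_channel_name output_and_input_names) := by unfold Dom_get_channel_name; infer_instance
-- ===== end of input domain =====

-- B validates names by set-inclusion in a frozen allowed-character set plus a head check (instead of
-- A's counter-driven per-character scan) and builds the result by a right-fold recursion behind a
-- prefix table (instead of A's three fixed format strings); objective: alternative, same cost.


-- ===== PORT A =====
-- Const1005.lower_alphabet_chars / number_chars ([chr(i) for i in range(...)])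
def pvLowerChars : List Char := (List.range 26).map (fun i => Char.ofNat (97 + i))
def pvNumberChars : List Char := (List.range 10).map (fun i => Char.ofNat (48 + i))

-- the 'for c in cpp_name' loop of is_valid_lower_case_cpp_name, carrying 'count'
def pvIsValidAux : List Char → Nat → Bool
  | [], count => decide (0 < count)
  | c :: rest, count =>
    if (decide (0 < count) && pvNumberChars.contains c) || pvLowerChars.contains c || c == '_' then
      pvIsValidAux rest (count + 1)
    else
      false

def is_valid_lower_case_cpp_name (cpp_name : String) : Bool :=
  pvIsValidAux cpp_name.toList 0

-- "%s"-interpolation is string concatenation: ported as String.ofList of the appended char lists (exact)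
def get_channel_name (output_and_input_names : List String) : String :=
  if (output_and_input_names.map is_valid_lower_case_cpp_name).all id then
    match output_and_input_names with
    | [a] => a
    | [a, b] => String.ofList ("D_".toList ++ a.toList ++ "_D_".toList ++ b.toList)
    | [a, b, c] =>
        String.ofList ("D2_".toList ++ a.toList ++ "_D_".toList ++ b.toList ++ "_D_".toList ++ c.toList)
    | _ => ""  -- Python: AssertionError "invalid input length" (excluded by Pre_)
  else "" -- Python: AssertionError "invalid input name" (excluded by Pre_)

-- ===== PORT B =====
def pvAllowedStr : String := "abcdefghijklmnopqrstuvwxyz0123456789_"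

-- n[:1].islower() or n[:1] == "_"  (islower on one printable-ASCII char = it is a lower-case letter)
def pvHeadOk (n : String) : Bool :=
  match n.toList with
  | [] => false
  | c :: _ => ('a' ≤ c && c ≤ 'z') || c == '_'

-- set(n) <= _ALLOWED and (n[:1].islower() or n[:1] == "_")
def pvValidB (n : String) : Bool :=
  PySem.Set.issubset (PySem.Set.ofList n.toList) (PySem.Set.ofList pvAllowedStr.toList) && pvHeadOk n

-- _fmt: right fold peeling the last name off; Python's str + is char-list append (exact)
def pvFmt (names : List String) : String :=
  match names with
  | [] => ""  -- unreachable in B: _fmt is only called with 1 ≤ len(names) (Python would not return here)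
  | [a] => a
  | x :: y :: rest =>
      String.ofList ((pvFmt (x :: y :: rest).dropLast).toList ++ "_D_".toList
        ++ ((x :: y :: rest).getLastD "").toList)
termination_by names.length
decreasing_by simp

def get_channel_name_alt (output_and_input_names : List String) : String :=
  if output_and_input_names.all pvValidB then
    if 1 ≤ output_and_input_names.length && output_and_input_names.length ≤ 3 then
      String.ofList ((["", "D_", "D2_"].getD (output_and_input_names.length - 1) "").toList
        ++ (pvFmt output_and_input_names).toList)
    else ""  -- Python: AssertionError "invalid input length" (excluded by Pre_)
  else "" -- Python: AssertionError "invalid input name" (excluded by Pre_)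

-- ===== PRECONDITION & SPEC =====
-- Pre_ excludes exactly the inputs on which the Python A raises AssertionError:
-- a length other than 1, 2, 3, or a name that is not a valid lower-case C++ identifier
-- (non-empty, first char [a-z_], remaining chars [a-z0-9_]).
def pvPreNameOk (s : String) : Bool :=
  match s.toList with
  | [] => false
  | c :: rest =>
      (('a' ≤ c && c ≤ 'z') || c == '_') &&
        rest.all (fun d => ('a' ≤ d && d ≤ 'z') || ('0' ≤ d && d ≤ '9') || d == '_')

def Pre_get_channel_name (output_and_input_names : List String) : Prop :=
  (output_and_input_names.length = 1 ∨ output_and_input_names.length = 2 ∨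
    output_and_input_names.length = 3) ∧
  ∀ s ∈ output_and_input_names, pvPreNameOk s = true
instance (output_and_input_names : List String) : Decidable (Pre_get_channel_name output_and_input_names) := by unfold Pre_get_channel_name; infer_instance

def pvWitness_get_channel_name : List String := ["out", "in_1"]

def Spec_get_channel_name (output_and_input_names : List String) (out : String) : Prop := out = get_channel_name_alt output_and_input_names
instance (output_and_input_names : List String) (out : String) : Decidable (Spec_get_channel_name output_and_input_names out) := by unfold Spec_get_channel_name; infer_instance

-- ===== CLAIM (what is proved, stated in full; the proofs are below) =====
def Claim_equal_get_channel_name : Prop := ∀ (output_and_input_names : List String), Dom_get_channel_name output_and_input_names → Pre_get_channel_name output_and_input_names → Spec_get_channel_name output_and_input_names (get_channel_name output_and_input_names)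

-- ===== LEMMAS AND PROOFS =====

theorem pv_toNat_ofNat_small (n : Nat) (h : n < 55296) : (Char.ofNat n).toNat = n := by
  rw [Char.toNat_ofNat, if_pos (Or.inl h)]

theorem pv_mem_range_chars (base len : Nat) (hb : base + len < 55296) (c : Char) :
    ((List.range len).map (fun i => Char.ofNat (base + i))).contains c
      = (decide (base ≤ c.toNat) && decide (c.toNat ≤ base + len - 1) && decide (0 < len)) := by
  rw [Bool.eq_iff_iff]
  simp only [List.contains_eq_mem, List.mem_map, List.mem_range, decide_eq_true_eq,
    Bool.and_eq_true, decide_eq_true_eq]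
  constructor
  · rintro ⟨i, hi, rfl⟩
    rw [pv_toNat_ofNat_small _ (by omega)]
    omega
  · rintro ⟨⟨h1, h2⟩, h3⟩
    refine ⟨c.toNat - base, by omega, ?_⟩
    have hcb : base + (c.toNat - base) = c.toNat := by omega
    rw [hcb]
    exact Char.ofNat_toNat c

theorem pv_mem_lower (c : Char) : pvLowerChars.contains c = ('a' ≤ c && c ≤ 'z') := by
  rw [pvLowerChars, pv_mem_range_chars 97 26 (by omega) c]
  simp [Char.le_def, UInt32.le_iff_toNat_le]

theorem pv_mem_number (c : Char) : pvNumberChars.contains c = ('0' ≤ c && c ≤ '9') := by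
  rw [pvNumberChars, pv_mem_range_chars 48 10 (by omega) c]
  simp [Char.le_def, UInt32.le_iff_toNat_le]

-- A's loop accepts any tail of chars from [a-z0-9_] once count is positive
theorem pv_aux_of_tailOk (cs : List Char) (count : Nat) (hc : 0 < count)
    (h : ∀ d ∈ cs, (('a' ≤ d && d ≤ 'z') || ('0' ≤ d && d ≤ '9') || d == '_') = true) :
    pvIsValidAux cs count = true := by
  induction cs generalizing count with
  | nil => simpa [pvIsValidAux]
  | cons c rest ih =>
    have hcond : ((decide (0 < count) && pvNumberChars.contains c) || pvLowerChars.contains c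
        || (c == '_')) = true := by
      rw [pv_mem_lower, pv_mem_number]
      have := h c (by simp)
      simp only [Bool.or_eq_true, Bool.and_eq_true, decide_eq_true_eq, beq_iff_eq] at this ⊢
      simp [hc]
      tauto
    rw [pvIsValidAux, if_pos hcond]
    exact ih (count + 1) (by omega) (fun d hd => h d (List.mem_cons_of_mem _ hd))

-- Pre_'s name shape implies A's scan succeeds
theorem pv_validA_of_pre (s : String) (h : pvPreNameOk s = true) :
    is_valid_lower_case_cpp_name s = true := by
  rw [is_valid_lower_case_cpp_name]
  rw [pvPreNameOk] at h
  cases hs : s.toList with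
  | nil => rw [hs] at h; simp at h
  | cons c rest =>
    rw [hs] at h
    simp only [Bool.and_eq_true] at h
    have hcond : ((decide (0 < 0) && pvNumberChars.contains c) || pvLowerChars.contains c
        || (c == '_')) = true := by
      rw [pv_mem_lower]
      have := h.1
      simp only [Bool.or_eq_true, Bool.and_eq_true, decide_eq_true_eq, beq_iff_eq] at this
      simp
      tauto
    rw [pvIsValidAux, if_pos hcond]
    refine pv_aux_of_tailOk rest 1 (by omega) ?_
    simpa only [List.all_eq_true] using h.2

-- the frozen allowed set is lower ++ digits ++ underscore
theorem pv_allowed_eq : pvAllowedStr.toList = pvLowerChars ++ pvNumberChars ++ ['_'] := by decide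

theorem pv_mem_allowed (c : Char) :
    c ∈ pvAllowedStr.toList
      ↔ (('a' ≤ c && c ≤ 'z') || ('0' ≤ c && c ≤ '9') || c == '_') = true := by
  rw [pv_allowed_eq]
  simp only [List.mem_append, List.mem_singleton, Bool.or_eq_true, beq_iff_eq]
  rw [← List.contains_iff_mem, ← List.contains_iff_mem, pv_mem_lower, pv_mem_number]

-- Pre_'s name shape implies B's set-inclusion + head check succeeds
theorem pv_validB_of_pre (s : String) (h : pvPreNameOk s = true) : pvValidB s = true := by
  rw [pvValidB, Bool.and_eq_true]
  rw [pvPreNameOk] at h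
  cases hs : s.toList with
  | nil => rw [hs] at h; simp at h
  | cons c rest =>
    rw [hs] at h
    simp only [Bool.and_eq_true, List.all_eq_true] at h
    constructor
    · rw [PySem.Set.issubset_iff]
      intro x hx
      rw [PySem.Set.mem_ofList] at hx ⊢
      rw [pv_mem_allowed]
      rcases List.mem_cons.mp hx with rfl | hx'
      · have := h.1
        simp only [Bool.or_eq_true, Bool.and_eq_true, beq_iff_eq] at this ⊢
        tauto
      · exact h.2 x hx'
    · rw [pvHeadOk, hs]
      exact h.1

theorem pv_all_valid (names : List String) (h : ∀ s ∈ names, pvPreNameOk s = true) :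
    ((names.map is_valid_lower_case_cpp_name).all id) = true ∧ (names.all pvValidB) = true := by
  constructor
  · simp only [List.all_map, List.all_eq_true, Function.comp]
    exact fun s hs => pv_validA_of_pre s (h s hs)
  · simp only [List.all_eq_true]
    exact fun s hs => pv_validB_of_pre s (h s hs)

-- ===== VERDICT (by name: the statement is the Claim_ definition above) =====
theorem get_channel_name_spec : Claim_equal_get_channel_name := by
  intro names _ hpre
  obtain ⟨hlen, hval⟩ := hpre
  obtain ⟨hA, hB⟩ := pv_all_valid names hval
  unfold Spec_get_channel_name get_channel_name get_channel_name_alt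
  rw [if_pos hA, if_pos hB]
  rcases hlen with h1 | h2 | h3
  · obtain ⟨a, rfl⟩ : ∃ a, names = [a] := by
      match names, h1 with
      | [a], _ => exact ⟨a, rfl⟩
    simp [pvFmt]
  · obtain ⟨a, b, rfl⟩ : ∃ a b, names = [a, b] := by
      match names, h2 with
      | [a, b], _ => exact ⟨a, b, rfl⟩
    simp [pvFmt, String.toList_ofList]
  · obtain ⟨a, b, c, rfl⟩ : ∃ a b c, names = [a, b, c] := by
      match names, h3 with
      | [a, b, c], _ => exact ⟨a, b, c, rfl⟩
    simp [pvFmt, String.toList_ofList]
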